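-- pv_equiv track=rewrite | github.com/elizabethanderson4250/csv-surgeon | csv_surgeon/window.py | lag
-- ===== SOURCE A (Python) =====
-- from collections import deque
-- from typing import Callable, Dict, Generator, Iterable, List, Optional
--
-- def lag(
--     rows: Iterable[Dict[str, str]],
--     column: str,
--     periods: int = 1,
--     output_column: Optional[str] = None,
--     fill_value: str = "",
-- ) -> Generator[Dict[str, str], None, None]:
--     """Add a lagged version of *column* shifted back by *periods* rows."""
--     if periods < 1:
--         raise ValueError("periods must be at least 1")
--     out_col = output_column or f"{column}_lag{periods}"
--     buf: deque = deque(maxlen=periods)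
--     for row in rows:
--         new_row = dict(row)
--         if len(buf) < periods:
--             new_row[out_col] = fill_value
--         else:
--             new_row[out_col] = buf[0]
--         buf.append(row.get(column, fill_value))
--         yield new_row
-- ===== SOURCE B (Python) =====
-- def lag(rows, column, periods=1, output_column=None, fill_value=""):
--     """Add a lagged version of *column* shifted back by *periods* rows."""
--     if periods < 1:
--         raise ValueError("periods must be at least 1")
--     out_col = output_column or f"{column}_lag{periods}"
--     rows = list(rows)
--     for i, row in enumerate(rows):
--         if i < periods:
--             v = fill_value
--         else:
--             v = rows[i - periods].get(column, fill_value)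
--         yield {**row, out_col: v}
-- ===== Notes on version B (the rewrite author's own statement) =====
-- stated objective: simpler
-- what changed: Replaces the bounded deque buffer and its length bookkeeping with direct random access: materialise the rows and read the lag value straight from rows[i - periods], closed-form per index.
import Mathlib
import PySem

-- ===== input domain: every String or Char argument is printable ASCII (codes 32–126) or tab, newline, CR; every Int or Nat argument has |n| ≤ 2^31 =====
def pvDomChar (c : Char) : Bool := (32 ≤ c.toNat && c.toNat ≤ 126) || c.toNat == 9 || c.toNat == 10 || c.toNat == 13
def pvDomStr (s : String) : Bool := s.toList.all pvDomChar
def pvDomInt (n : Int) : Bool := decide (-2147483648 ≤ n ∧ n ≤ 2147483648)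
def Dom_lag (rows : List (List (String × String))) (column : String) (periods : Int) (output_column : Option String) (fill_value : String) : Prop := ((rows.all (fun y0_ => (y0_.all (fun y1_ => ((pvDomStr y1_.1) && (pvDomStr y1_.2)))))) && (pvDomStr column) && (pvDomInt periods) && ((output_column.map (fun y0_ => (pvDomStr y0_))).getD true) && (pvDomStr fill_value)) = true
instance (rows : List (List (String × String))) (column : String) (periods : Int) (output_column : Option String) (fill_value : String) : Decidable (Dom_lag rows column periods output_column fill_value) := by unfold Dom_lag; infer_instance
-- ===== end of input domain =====

-- ===== PORT A =====
-- header: B reads the lag value by direct indexing rows[i - periods] instead of A's bounded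
-- deque buffer; same O(n) cost, simpler per-row logic (equivalence is about return values).
def lagOutCol (column : String) (periods : Int) (output_column : Option String) : String :=
  match output_column with
  | some s => if s = "" then column ++ "_lag" ++ PySem.Int.toStr periods else s
  | none => column ++ "_lag" ++ PySem.Int.toStr periods

def lagGo (column out_col fill_value : String) (periods : Int) :
    List (List (String × String)) → List String → List (List (String × String))
  | [], _ => []
  | row :: rest, buf =>
    let v : String := if (buf.length : Int) < periods then fill_value else buf.headD fill_value
    let new_row := ((PySem.Dict.ofList row).insert out_col v).items
    let b := buf ++ [(PySem.Dict.ofList row).getD column fill_value]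
    let buf' := if (b.length : Int) > periods then b.tail else b
    new_row :: lagGo column out_col fill_value periods rest buf'

def lag (rows : List (List (String × String))) (column : String) (periods : Int) (output_column : Option String) (fill_value : String) : List (List (String × String)) :=
  if periods < 1 then []  -- Python raises ValueError here; excluded by Pre_lag
  else lagGo column (lagOutCol column periods output_column) fill_value periods rows []

-- ===== PORT B =====
def lag_alt (rows : List (List (String × String))) (column : String) (periods : Int) (output_column : Option String) (fill_value : String) : List (List (String × String)) :=
  if periods < 1 then []  -- Python raises ValueError here; excluded by Pre_lag
  else
    let out_col := lagOutCol column periods output_column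
    (PySem.List.enumerate rows).map (fun p =>
      let v : String :=
        if p.1 < periods then fill_value
        -- rows[i - periods]: index provably in range (periods ≤ i < len rows), so the
        -- pyGet? result is always `some`; `.getD []` only discharges the Option.
        else PySem.Dict.getD (PySem.Dict.ofList ((PySem.List.pyGet? rows (p.1 - periods)).getD [])) column fill_value
      ((PySem.Dict.ofList p.2).insert out_col v).items)

-- ===== PRECONDITION & SPEC =====
-- Pre_lag excludes exactly the inputs where A raises ValueError (periods < 1).
def Pre_lag (rows : List (List (String × String))) (column : String) (periods : Int) (output_column : Option String) (fill_value : String) : Prop := 1 ≤ periods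
instance (rows : List (List (String × String))) (column : String) (periods : Int) (output_column : Option String) (fill_value : String) : Decidable (Pre_lag rows column periods output_column fill_value) := by unfold Pre_lag; infer_instance

def pvWitness_lag : (List (List (String × String))) × String × Int × Option String × String :=
  ([[("a", "1")], [("a", "2")], [("b", "x")]], "a", 1, none, "")

def Spec_lag (rows : List (List (String × String))) (column : String) (periods : Int) (output_column : Option String) (fill_value : String) (out : List (List (String × String))) : Prop := out = lag_alt rows column periods output_column fill_value
instance (rows : List (List (String × String))) (column : String) (periods : Int) (output_column : Option String) (fill_value : String) (out : List (List (String × String))) : Decidable (Spec_lag rows column periods output_column fill_value out) := by unfold Spec_lag; infer_instance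

-- ===== CLAIM (what is proved, stated in full; the proofs are below) =====
def Claim_equal_lag : Prop := ∀ (rows : List (List (String × String))) (column : String) (periods : Int) (output_column : Option String) (fill_value : String), Dom_lag rows column periods output_column fill_value → Pre_lag rows column periods output_column fill_value → Spec_lag rows column periods output_column fill_value (lag rows column periods output_column fill_value)

-- ===== LEMMAS AND PROOFS =====

-- the lag value per A's buffer, expressed at absolute index pre.length into rows
def lagVal (column fill_value : String) (r : List (String × String)) : String :=
  PySem.Dict.getD (PySem.Dict.ofList r) column fill_value

def lagWindow (column fill_value : String) (pN : Nat) (pre : List (List (String × String))) : List String :=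
  (pre.map (lagVal column fill_value)).drop (pre.length - pN)

theorem lagGo_eq (column out_col fill_value : String) (periods : Int)
    (hp : 1 ≤ periods)
    (rows : List (List (String × String))) :
    ∀ (suf pre : List (List (String × String))), rows = pre ++ suf →
    lagGo column out_col fill_value periods suf (lagWindow column fill_value periods.toNat pre) =
      (PySem.List.enumerate suf (pre.length : Int)).map (fun p =>
        let v : String :=
          if p.1 < periods then fill_value
          else PySem.Dict.getD (PySem.Dict.ofList ((PySem.List.pyGet? rows (p.1 - periods)).getD [])) column fill_value
        ((PySem.Dict.ofList p.2).insert out_col v).items) := by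
  intro suf
  induction suf with
  | nil => intro pre _; simp [lagGo, PySem.List.enumerate]
  | cons r rest ih =>
    intro pre hrows
    have hpN : (periods.toNat : Int) = periods := Int.toNat_of_nonneg (by omega)
    set pN := periods.toNat with hpNdef
    set n := pre.length with hn
    have hpN1 : 1 ≤ pN := by omega
    have hwinlen : (lagWindow column fill_value pN pre).length = min n pN := by
      simp [lagWindow, ← hn]; omega
    have hcond : ((lagWindow column fill_value pN pre).length : Int) < periods ↔ (n : Int) < periods := by
      rw [hwinlen]; omega
    rw [lagGo, PySem.List.enumerate_cons, List.map_cons]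
    congr 1
    · -- the emitted row agrees
      simp only
      by_cases hlt : (n : Int) < periods
      · rw [if_pos (hcond.mpr hlt), if_pos hlt]
      · rw [if_neg (hcond.not.mpr hlt), if_neg hlt]
        have hple : pN ≤ n := by omega
        have hidx : n - pN < pre.length := by omega
        have hget : (PySem.List.pyGet? rows ((n : Int) - periods)) = some pre[n - pN] := by
          have h1 : (n : Int) - periods = ((n - pN : Nat) : Int) := by omega
          rw [h1, PySem.List.pyGet?_natCast, hrows, List.getElem?_append_left hidx]
          simp
        rw [hget]
        have hdrop : (pre.map (lagVal column fill_value)).drop (n - pN)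
            = lagVal column fill_value pre[n - pN] ::
              (pre.map (lagVal column fill_value)).drop (n - pN + 1) := by
          rw [List.drop_eq_getElem_cons (by simpa using hidx)]
          simp [hidx]
        have hhead : (lagWindow column fill_value pN pre).headD fill_value
            = lagVal column fill_value pre[n - pN] := by
          show ((pre.map (lagVal column fill_value)).drop (n - pN)).headD fill_value = _
          rw [hdrop]; rfl
        rw [hhead]; rfl
    · -- the tail: the pushed buffer is the window of pre ++ [r]
      have hpush : (let b := lagWindow column fill_value pN pre ++ [(PySem.Dict.ofList r).getD column fill_value];
          if (b.length : Int) > periods then b.tail else b) =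
          lagWindow column fill_value pN (pre ++ [r]) := by
        simp only [List.length_append, List.length_cons, List.length_nil, hwinlen]
        by_cases hlt : n < pN
        · rw [if_neg (by omega)]
          have h0 : n - pN = 0 := by omega
          have h1 : n + 1 - pN = 0 := by omega
          simp [lagWindow, ← hn, h0, h1, lagVal]
        · rw [if_pos (by omega)]
          have hnilw : lagWindow column fill_value pN pre ≠ [] := by
            intro hcontra
            rw [hcontra] at hwinlen; simp at hwinlen; omega
          rw [List.tail_append_of_ne_nil hnilw]
          show ((pre.map (lagVal column fill_value)).drop (n - pN)).tail ++ _ = _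
          rw [List.tail_drop]
          simp only [lagWindow, List.map_append, List.map_cons, List.map_nil,
            List.length_append, List.length_cons, List.length_nil, ← hn]
          rw [List.drop_append_of_le_length (by simp [← hn]; omega)]
          have hix : n + 1 - pN = n - pN + 1 := by omega
          rw [hix]; rfl
      rw [hpush, ih (pre ++ [r]) (by simp [hrows])]
      have : ((pre ++ [r]).length : Int) = (n : Int) + 1 := by simp [← hn]
      rw [this]

theorem lag_spec : Claim_equal_lag := by
  intro rows column periods output_column fill_value _ hpre
  unfold Spec_lag lag lag_alt
  rw [if_neg (by exact not_lt.mpr hpre), if_neg (by exact not_lt.mpr hpre)]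
  have h := lagGo_eq column (lagOutCol column periods output_column) fill_value periods hpre rows rows [] (by simp)
  simpa [lagWindow] using h
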